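-- pv_equiv track=rewrite | github.com/siddBhandari/Real-Time-Bitcoin-Price-Change-Prediction-Using-Twitter-Sentiment-Analysis | twitter-spam/detection/main1.py | tokenize_remove_punctuations
-- ===== SOURCE A (Python) =====
-- import string
--
-- def tokenize_remove_punctuations(text):
--     clean_text = []
--     text = text.split(" ")
--     for word in text:
--         word = list(word)
--         new_word = []
--         for c in word:
--             if c not in string.punctuation:
--                 new_word.append(c)
--         word = "".join(new_word)
--         if len(word)>0:
--             clean_text.append(word)
--     return clean_text
-- ===== SOURCE B (Python) =====
-- import string
--
-- def tokenize_remove_punctuations(text):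
--     clean_text = []
--     buf = ""
--     for c in text:
--         if c == " ":
--             if buf:
--                 clean_text.append(buf)
--             buf = ""
--         elif c in string.punctuation:
--             pass
--         else:
--             buf += c
--     if buf:
--         clean_text.append(buf)
--     return clean_text
-- ===== Notes on version B (the rewrite author's own statement) =====
-- stated objective: faster
-- what changed: Replaced split-then-per-word-filter (split(' '), per-word char list, join, length test) by a single-pass character scanner with a token buffer that flushes on spaces and skips punctuation.
import Mathlib
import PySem

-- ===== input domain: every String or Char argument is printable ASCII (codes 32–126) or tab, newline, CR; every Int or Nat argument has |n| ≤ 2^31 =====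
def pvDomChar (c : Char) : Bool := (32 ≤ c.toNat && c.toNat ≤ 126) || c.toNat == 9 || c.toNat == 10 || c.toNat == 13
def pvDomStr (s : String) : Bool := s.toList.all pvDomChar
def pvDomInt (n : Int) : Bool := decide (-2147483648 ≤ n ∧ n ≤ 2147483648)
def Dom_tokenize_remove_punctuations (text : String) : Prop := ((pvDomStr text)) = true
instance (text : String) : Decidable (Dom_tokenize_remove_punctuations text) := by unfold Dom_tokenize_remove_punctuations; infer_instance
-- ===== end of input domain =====

-- B replaces A's split(" ")-then-per-word-filter pipeline by a single-pass character
-- scanner with a token buffer (objective: faster by a constant factor, one pass, no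
-- intermediate per-word lists).

-- string.punctuation (shared constant)
def pyPunct : List Char := "!\"#$%&'()*+,-./:;<=>?@[\\]^_`{|}~".toList

-- ===== PORT A =====
def tokenize_remove_punctuations (text : String) : List String :=
  (PySem.Chars.splitOn text.toList [' ']).foldl
    (fun clean_text word =>
      let new_word := word.foldl
        (fun nw c => if !(pyPunct.contains c) then nw ++ [c] else nw) ([] : List Char)
      if new_word.length > 0 then clean_text ++ [String.mk new_word] else clean_text)
    []

-- ===== PORT B =====
-- B-side helpers: the scanner's loop body and the final flush of Source B
def pvStepB (p : List String × List Char) (c : Char) : List String × List Char :=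
  if c = ' ' then
    (if p.2.isEmpty then p.1 else p.1 ++ [String.mk p.2], [])
  else if pyPunct.contains c then p
  else (p.1, p.2 ++ [c])

def pvFlushB (p : List String × List Char) : List String :=
  if p.2.isEmpty then p.1 else p.1 ++ [String.mk p.2]

def tokenize_remove_punctuations_alt (text : String) : List String :=
  pvFlushB (text.toList.foldl pvStepB ([], []))

-- ===== PRECONDITION & SPEC =====
def Spec_tokenize_remove_punctuations (text : String) (out : List String) : Prop := out = tokenize_remove_punctuations_alt text
instance (text : String) (out : List String) : Decidable (Spec_tokenize_remove_punctuations text out) := by unfold Spec_tokenize_remove_punctuations; infer_instance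

-- ===== CLAIM (what is proved, stated in full; the proofs are below) =====
def Claim_equal_tokenize_remove_punctuations : Prop := ∀ (text : String), Dom_tokenize_remove_punctuations text → Spec_tokenize_remove_punctuations text (tokenize_remove_punctuations text)

-- ===== LEMMAS AND PROOFS =====

-- recursive characterisation of split(" ") on lists of chars
def spSplit : List Char → List (List Char)
  | [] => [[]]
  | c :: cs => if c = ' ' then [] :: spSplit cs else (spSplit cs).modifyHead (fun w => c :: w)

lemma spSplit_ne_nil (cs : List Char) : spSplit cs ≠ [] := by
  induction cs with
  | nil => simp [spSplit]
  | cons c cs ih =>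
    simp only [spSplit]
    split
    · simp
    · cases h : spSplit cs with
      | nil => exact absurd h ih
      | cons w ws => simp [List.modifyHead]

lemma modifyHead_id' {α : Type} (l : List α) : l.modifyHead (fun w => w) = l := by
  cases l <;> simp [List.modifyHead]

lemma go_eq : ∀ (fuel : Nat) (l cur : List Char) (acc : List (List Char)),
    l.length < fuel →
    PySem.Chars.splitOn.go [' '] fuel l cur acc
      = acc.reverse ++ (spSplit l).modifyHead (fun w => cur.reverse ++ w) := by
  intro fuel
  induction fuel with
  | zero => intro l cur acc h; omega
  | succ fuel ih =>
    intro l cur acc h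
    cases l with
    | nil => simp [PySem.Chars.splitOn.go, spSplit, List.modifyHead]
    | cons c rest =>
      rw [PySem.Chars.splitOn.go]
      by_cases hc : c = ' '
      · subst hc
        have hpre : List.isPrefixOf [' '] (' ' :: rest) = true := by
          simp [List.isPrefixOf]
        simp only [hpre]
        rw [ih _ _ _ (by simpa using Nat.lt_of_succ_lt_succ h)]
        cases hsp : spSplit rest with
        | nil => exact absurd hsp (spSplit_ne_nil rest)
        | cons w ws => simp [spSplit, hsp, List.modifyHead]
      · have hpre : List.isPrefixOf [' '] (c :: rest) = false := by
          simp [List.isPrefixOf]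
          intro hcon; exact absurd hcon.symm hc
        simp only [hpre, Bool.false_eq_true, if_false]
        rw [ih _ _ _ (by simpa using Nat.lt_of_succ_lt_succ h)]
        simp only [spSplit, if_neg hc]
        cases hsp : spSplit rest with
        | nil => exact absurd hsp (spSplit_ne_nil rest)
        | cons w ws => simp [List.modifyHead, List.append_assoc]

lemma splitOn_eq (cs : List Char) : PySem.Chars.splitOn cs [' '] = spSplit cs := by
  unfold PySem.Chars.splitOn
  rw [go_eq _ _ _ _ (by omega)]
  simp [modifyHead_id']

-- A's per-word body, and the loop body rewritten to a filter
def stepA (acc : List String) (word : List Char) : List String :=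
  let nw := word.filter (fun c => !pyPunct.contains c)
  if nw.length > 0 then acc ++ [String.mk nw] else acc

lemma inner_eq (acc : List String) (w : List Char) :
    (let new_word := w.foldl
        (fun nw c => if !(pyPunct.contains c) then nw ++ [c] else nw) ([] : List Char)
     if new_word.length > 0 then acc ++ [String.mk new_word] else acc) = stepA acc w := by
  simp only [PySem.List.foldl_append_if_eq_filter, List.nil_append, stepA]

lemma A_eq (text : String) :
    tokenize_remove_punctuations text = (spSplit text.toList).foldl stepA [] := by
  unfold tokenize_remove_punctuations
  rw [splitOn_eq]
  congr 1
  funext acc w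
  exact inner_eq acc w

lemma filter_all_keep (buf : List Char) (hbuf : ∀ x ∈ buf, x ∉ pyPunct) :
    buf.filter (fun c => !pyPunct.contains c) = buf :=
  List.filter_eq_self.mpr (fun a ha => by simp [hbuf a ha])

lemma stepB_space (acc : List String) (buf : List Char)
    (hbuf : ∀ x ∈ buf, x ∉ pyPunct) :
    pvStepB (acc, buf) ' ' = (stepA acc buf, []) := by
  have hf := filter_all_keep buf hbuf
  cases buf with
  | nil => simp [pvStepB, stepA]
  | cons b bs =>
    have hb : b ∉ pyPunct := hbuf b (by simp)
    simp only [stepA, pvStepB, hf]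
    simp

lemma scan_eq : ∀ (cs : List Char) (acc : List String) (buf : List Char),
    (∀ x ∈ buf, x ∉ pyPunct) →
    pvFlushB (cs.foldl pvStepB (acc, buf))
      = ((spSplit cs).modifyHead (fun w => buf ++ w)).foldl stepA acc := by
  intro cs
  induction cs with
  | nil =>
    intro acc buf hbuf
    have hf := filter_all_keep buf hbuf
    cases buf with
    | nil => simp [pvFlushB, spSplit, stepA, List.modifyHead]
    | cons b bs =>
      simp only [List.foldl_nil, pvFlushB, spSplit, List.modifyHead, List.foldl_cons, stepA,
        List.append_nil, hf]
      simp
  | cons c cs ih =>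
    intro acc buf hbuf
    rw [List.foldl_cons]
    by_cases hc : c = ' '
    · subst hc
      rw [stepB_space acc buf hbuf, ih _ _ (by simp)]
      simp only [spSplit, reduceIte]
      cases hsp : spSplit cs with
      | nil => exact absurd hsp (spSplit_ne_nil cs)
      | cons w ws => simp [List.modifyHead]
    · by_cases hp : c ∈ pyPunct
      · have h2 : pvStepB (acc, buf) c = (acc, buf) := by
          simp [pvStepB, hc, hp]
        rw [h2, ih _ _ hbuf]
        simp only [spSplit, if_neg hc]
        cases hsp : spSplit cs with
        | nil => exact absurd hsp (spSplit_ne_nil cs)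
        | cons w ws =>
          simp only [List.modifyHead, List.foldl_cons]
          have heq : stepA acc (buf ++ w) = stepA acc (buf ++ c :: w) := by
            simp [stepA, List.filter_append, hp]
          rw [heq]
      · have h2 : pvStepB (acc, buf) c = (acc, buf ++ [c]) := by
          simp [pvStepB, hc, hp]
        rw [h2, ih _ _ (by
          intro x hx
          rcases List.mem_append.mp hx with hx | hx
          · exact hbuf x hx
          · simp at hx; subst hx; exact hp)]
        simp only [spSplit, if_neg hc]
        cases hsp : spSplit cs with
        | nil => exact absurd hsp (spSplit_ne_nil cs)
        | cons w ws => simp [List.modifyHead, List.append_assoc]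

-- ===== VERDICT (by name: the statement is the Claim_ definition above) =====
theorem tokenize_remove_punctuations_spec : Claim_equal_tokenize_remove_punctuations := by
  intro text _
  unfold Spec_tokenize_remove_punctuations tokenize_remove_punctuations_alt
  rw [A_eq, scan_eq text.toList [] [] (by simp)]
  simp only [List.nil_append, modifyHead_id']
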